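-- pv_equiv track=rewrite | github.com/AMOSFinds/password-checker | password_checker.py | check_character_variety
-- ===== SOURCE A (Python) =====
-- import string
--
-- def check_character_variety(password):
--     """Check character variety in password"""
--     checks = {
--         'lowercase': any(c.islower() for c in password),
--         'uppercase': any(c.isupper() for c in password),
--         'digits': any(c.isdigit() for c in password),
--         'special': any(c in string.punctuation for c in password),
--         'length': len(password) >= 8
--     }
--     return checks
-- ===== SOURCE B (Python) =====
-- import string
--
-- _CLASSES = ('lowercase', 'uppercase', 'digits', 'special')
--
-- def _category(c):
--     """Map a character to the single class it belongs to (classes are disjoint)."""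
--     if c.islower():
--         return 'lowercase'
--     if c.isupper():
--         return 'uppercase'
--     if c.isdigit():
--         return 'digits'
--     if c in string.punctuation:
--         return 'special'
--     return None
--
-- def check_character_variety(password):
--     """Check character variety in password"""
--     seen = {_category(c) for c in password}
--     checks = {k: k in seen for k in _CLASSES}
--     checks['length'] = len(password) >= 8
--     return checks
-- ===== Notes on version B (the rewrite author's own statement) =====
-- stated objective: faster
-- what changed: Instead of testing each character class with its own any() scan, B classifies every character once into its unique (disjoint) class, collects the set of classes that occur, and answers each dict entry by membership in that set.
import Mathlib
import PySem

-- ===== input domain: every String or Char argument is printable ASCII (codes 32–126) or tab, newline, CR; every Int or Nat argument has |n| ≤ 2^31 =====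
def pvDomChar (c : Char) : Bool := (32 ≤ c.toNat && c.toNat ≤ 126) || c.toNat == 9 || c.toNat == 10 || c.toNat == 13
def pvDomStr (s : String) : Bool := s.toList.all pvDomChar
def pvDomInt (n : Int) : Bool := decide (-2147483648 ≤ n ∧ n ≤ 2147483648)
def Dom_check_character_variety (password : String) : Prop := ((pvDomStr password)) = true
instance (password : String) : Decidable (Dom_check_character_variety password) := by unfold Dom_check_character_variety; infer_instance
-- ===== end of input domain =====

-- B classifies each character once into its unique (disjoint) class and answers by membership in the set of classes seen, instead of A's per-class scans.

-- membership in string.punctuation (Python's 'c in string.punctuation'); exact: the literal 32 ASCII punctuation characters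
def pvIsPunct (c : Char) : Bool := "!\"#$%&'()*+,-./:;<=>?@[\\]^_`{|}~".toList.contains c

-- ===== PORT A =====
def check_character_variety (password : String) : List (String × Bool) :=
  [("lowercase", password.toList.any (fun c => PySem.Chars.islower c)),
   ("uppercase", password.toList.any (fun c => PySem.Chars.isupper c)),
   ("digits",    password.toList.any (fun c => PySem.Chars.isdigit c)),
   ("special",   password.toList.any (fun c => pvIsPunct c)),
   ("length",    decide (password.toList.length ≥ 8))]

-- ===== PORT B =====
-- _category: the single class a character belongs to (classes are disjoint), or none
def pvCategory (c : Char) : Option String :=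
  if PySem.Chars.islower c then some "lowercase"
  else if PySem.Chars.isupper c then some "uppercase"
  else if PySem.Chars.isdigit c then some "digits"
  else if pvIsPunct c then some "special"
  else none

def check_character_variety_alt (password : String) : List (String × Bool) :=
  let seen : PySem.Set (Option String) :=
    PySem.Set.ofList (password.toList.map pvCategory)
  (["lowercase", "uppercase", "digits", "special"].map
    (fun k => (k, seen.contains (some k))))
  ++ [("length", decide (password.toList.length ≥ 8))]

-- ===== PRECONDITION & SPEC =====
def Spec_check_character_variety (password : String) (out : List (String × Bool)) : Prop := out = check_character_variety_alt password
instance (password : String) (out : List (String × Bool)) : Decidable (Spec_check_character_variety password out) := by unfold Spec_check_character_variety; infer_instance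

-- ===== CLAIM =====
def Claim_equal_check_character_variety : Prop := ∀ (password : String), Dom_check_character_variety password → Spec_check_character_variety password (check_character_variety password)

-- ===== LEMMAS AND PROOFS =====

-- pvCategory hits a class iff the corresponding predicate holds (the four classes are disjoint)
theorem cat_lower (c : Char) : (pvCategory c = some "lowercase") ↔ PySem.Chars.islower c = true := by
  unfold pvCategory; split_ifs with h1 h2 h3 h4 <;> simp_all

theorem cat_upper (c : Char) : (pvCategory c = some "uppercase") ↔ PySem.Chars.isupper c = true := by
  unfold pvCategory
  have : PySem.Chars.isupper c = true → PySem.Chars.islower c = false := by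
    simp [PySem.Chars.isupper, PySem.Chars.islower, Char.le_def, UInt32.le_iff_toNat_le]; omega
  split_ifs with h1 h2 h3 h4 <;> simp_all

theorem cat_digit (c : Char) : (pvCategory c = some "digits") ↔ PySem.Chars.isdigit c = true := by
  unfold pvCategory
  have h1 : PySem.Chars.isdigit c = true → PySem.Chars.islower c = false := by
    simp [PySem.Chars.isdigit, PySem.Chars.islower, Char.le_def, UInt32.le_iff_toNat_le]; omega
  have h2 : PySem.Chars.isdigit c = true → PySem.Chars.isupper c = false := by
    simp [PySem.Chars.isdigit, PySem.Chars.isupper, Char.le_def, UInt32.le_iff_toNat_le]; omega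
  split_ifs <;> simp_all

theorem punct_not_alnum (c : Char) (h : pvIsPunct c = true) :
    PySem.Chars.islower c = false ∧ PySem.Chars.isupper c = false ∧ PySem.Chars.isdigit c = false := by
  simp [pvIsPunct] at h
  rcases h with rfl|rfl|rfl|rfl|rfl|rfl|rfl|rfl|rfl|rfl|rfl|rfl|rfl|rfl|rfl|rfl|rfl|rfl|rfl|rfl|rfl|rfl|rfl|rfl|rfl|rfl|rfl|rfl|rfl|rfl|rfl|rfl <;> decide

theorem cat_special (c : Char) : (pvCategory c = some "special") ↔ pvIsPunct c = true := by
  unfold pvCategory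
  by_cases hp : pvIsPunct c = true
  · obtain ⟨e1, e2, e3⟩ := punct_not_alnum c hp
    simp [e1, e2, e3, hp]
  · split_ifs <;> simp_all

theorem seen_contains (l : List Char) (k : String) (p : Char → Bool)
    (hp : ∀ c, (pvCategory c = some k) ↔ p c = true) :
    (PySem.Set.ofList (l.map pvCategory)).contains (some k) = l.any p := by
  have : (some k ∈ PySem.Set.ofList (l.map pvCategory)) ↔ (∃ c ∈ l, p c = true) := by
    rw [PySem.Set.mem_ofList]
    simp only [List.mem_map]
    constructor
    · rintro ⟨c, hc, hk⟩; exact ⟨c, hc, (hp c).mp hk⟩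
    · rintro ⟨c, hc, hk⟩; exact ⟨c, hc, (hp c).mpr hk⟩
  simp only [PySem.Set.contains]
  rw [Bool.eq_iff_iff, List.contains_iff_mem, List.any_eq_true]
  exact this

-- ===== VERDICT =====
theorem check_character_variety_spec : Claim_equal_check_character_variety := by
  intro password _
  unfold Spec_check_character_variety check_character_variety check_character_variety_alt
  simp only [List.map, List.cons_append, List.nil_append,
    seen_contains _ _ _ cat_lower, seen_contains _ _ _ cat_upper,
    seen_contains _ _ _ cat_digit, seen_contains _ _ _ cat_special]
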